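-- pv_equiv track=rewrite | github.com/zubie7a/Algorithms | CodeSignal/Arcade/The_Core/Level_08_Mirror_Lake/065_Most_Frequent_Digit_Sum.py | mostFrequentDigitSum
-- ===== SOURCE A (Python) =====
-- from collections import Counter
--
-- def mostFrequentDigitSum(n):
--     def digit_sum(num):
--         return sum(map(int, str(num)))
--
--     digit_sums = []
--     # Keep substracting from a number its own digit sum until
--     # it reaches 0, it's guaranteed to do so.
--     while n != 0:
--         d_sum = digit_sum(n)
--         digit_sums.append(d_sum)
--         n -= d_sum
--
--     # The count of how many times a digit-sum has appeared.
--     counter = Counter(digit_sums)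
--
--     # Maybe overkill, just iterate over the original counter and store
--     # the largest key with the largest count.
--     # -------
--     # Now reverse this map to go from counts of occurrences => sum.
--     # reverse_counter = {}
--     # for key in counter.keys():
--     #    value = counter[key]
--     #    if value not in reverse_counter:
--     #        reverse_counter[value] = []
--     #    reverse_counter[value].append(key)
--     #
--     # max_count = max(counter.values())
--     # max_key = sorted(reverse_counter[max_count])[-1]
--
--     max_count = -1
--     max_key = -1
--     for key, value in counter.items():
--         if value > max_count:
--             max_key = key
--             max_count = value
--         elif value == max_count:
--             max_key = max(key, max_key)
--
--     return max_key
-- ===== SOURCE B (Python) =====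
-- def mostFrequentDigitSum(n):
--     # B keeps the current number as a little-endian digit array with a cached
--     # digit sum: each step subtracts the digit sum in place with borrow
--     # propagation and updates the cached sum by the digits actually changed,
--     # instead of re-deriving the digit sum from scratch via str() every step.
--     digits = []
--     m = n
--     while m != 0:
--         m, r = divmod(m, 10)
--         digits.append(r)
--     s = sum(digits)
--     counts = {}
--     while s != 0:
--         counts[s] = counts.get(s, 0) + 1
--         # subtract s from the digit array, tracking the digit-sum delta
--         borrow = s
--         i = 0
--         new_s = s
--         while borrow != 0:
--             borrow, r = divmod(borrow, 10)
--             d = digits[i] - r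
--             if d < 0:
--                 d += 10
--                 borrow += 1
--             new_s += d - digits[i]
--             digits[i] = d
--             i += 1
--         s = new_s
--     return max(counts.items(), key=lambda kv: (kv[1], kv[0]), default=(-1, 0))[0]
-- ===== Notes on version B (the rewrite author's own statement) =====
-- stated objective: alternative
-- what changed: B never re-derives the digit sum from the number: it keeps the number as a little-endian digit array with a cached digit sum, subtracts the digit sum in place by borrow propagation, updating the cached sum only by the digits that actually changed, tallies counts as it goes, and picks the winner with one max() over (count, key) instead of A's str()-based digit_sum per step, collected list, Counter and manual scan.
import Mathlib
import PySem

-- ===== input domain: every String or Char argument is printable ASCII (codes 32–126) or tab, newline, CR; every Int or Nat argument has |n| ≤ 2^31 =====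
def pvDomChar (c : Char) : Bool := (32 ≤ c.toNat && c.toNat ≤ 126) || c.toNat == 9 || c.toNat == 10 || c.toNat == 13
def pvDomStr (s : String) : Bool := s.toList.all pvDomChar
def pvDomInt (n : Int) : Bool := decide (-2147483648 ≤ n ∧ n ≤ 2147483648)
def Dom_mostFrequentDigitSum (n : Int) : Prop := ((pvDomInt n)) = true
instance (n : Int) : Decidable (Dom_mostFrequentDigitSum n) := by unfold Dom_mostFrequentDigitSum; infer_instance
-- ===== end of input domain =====

-- B keeps the number as a little-endian digit array with a cached digit sum, subtracting
-- the digit sum in place by borrow propagation and updating the sum by the changed digits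
-- only, instead of re-deriving the digit sum from scratch via str() on every step.

-- ===== PORT A =====

-- digit_sum(num) = sum(map(int, str(num))); int(c) is PySem.Int.ofChars? [c],
-- never none on the digit characters reached under Pre_ (n ≥ 0).
def pvDigitSumA (num : Int) : Int :=
  ((PySem.Int.toChars num).map (fun c => (PySem.Int.ofChars? [c]).getD 0)).sum

-- the `while n != 0` loop building digit_sums; fuel n.toNat + 1 is ample since
-- n decreases by at least 1 each iteration (totality guard only).
def pvALoop : Nat → Int → List Int → List Int
  | 0, _, acc => acc
  | fuel + 1, n, acc =>
    if n ≠ 0 then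
      let dSum := pvDigitSumA n
      pvALoop fuel (n - dSum) (acc ++ [dSum])
    else acc

def mostFrequentDigitSum (n : Int) : Int :=
  let digitSums := pvALoop (n.toNat + 1) n []
  let counter := PySem.Dict.counter digitSums
  -- for key, value in counter.items(): running (max_count, max_key)
  let st := counter.items.foldl
    (fun (st : Int × Int) kv =>
      if kv.2 > st.1 then (kv.2, kv.1)
      else if kv.2 = st.1 then (st.1, max kv.1 st.2)
      else st)
    (-1, -1)
  st.2

-- ===== PORT B =====

-- `while m != 0: m, r = divmod(m, 10); digits.append(r)`; fuel m.toNat + 1 is ample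
-- since m shrinks tenfold each iteration (totality guard only).
def pvDigits : Nat → Int → List Int → List Int
  | 0, _, acc => acc
  | fuel + 1, m, acc =>
    if m ≠ 0 then
      pvDigits fuel (PySem.Int.floordiv m 10) (acc ++ [PySem.Int.mod m 10])
    else acc

-- inner `while borrow != 0` borrow-propagation loop; i increments each iteration and
-- stays below the array length under the loop invariant, so fuel D.length + 1 is ample
-- (totality guard only); digits[i] is in range there, `.getD 0` is a totality default.
def pvBSub : Nat → List Int → Nat → Int → Int → List Int × Int
  | 0, D, _, _, ns => (D, ns)
  | fuel + 1, D, i, borrow, ns =>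
    if borrow ≠ 0 then
      let b0 := PySem.Int.floordiv borrow 10
      let r := PySem.Int.mod borrow 10
      let di := (PySem.List.pyGet? D (i : Int)).getD 0
      let d := di - r
      let d' := if d < 0 then d + 10 else d
      let b' := if d < 0 then b0 + 1 else b0
      pvBSub fuel (D.set i d') (i + 1) b' (ns + (d' - di))
    else (D, ns)

-- the outer `while s != 0` loop; each step subtracts s ≥ 1 from the represented value,
-- so fuel n.toNat + 1 is ample (totality guard only).
def pvBMain : Nat → List Int → Int → PySem.Dict Int Int → PySem.Dict Int Int
  | 0, _, _, counts => counts
  | fuel + 1, D, s, counts =>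
    if s ≠ 0 then
      let counts' := counts.insert s (counts.getD s 0 + 1)
      let p := pvBSub (D.length + 1) D 0 s s
      pvBMain fuel p.1 p.2 counts'
    else counts

def mostFrequentDigitSum_alt (n : Int) : Int :=
  let D := pvDigits (n.toNat + 1) n []
  let s := D.sum
  let counts := pvBMain (n.toNat + 1) D s PySem.Dict.empty
  ((PySem.List.max2? counts.items (fun kv => kv.2) (fun kv => kv.1)).getD (-1, 0)).1

-- ===== PRECONDITION & SPEC =====
-- Pre_ excludes exactly the negative n, on which A raises ValueError (int('-') on the
-- sign character of str(n)) and B's own digitization loop would not terminate.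
def Pre_mostFrequentDigitSum (n : Int) : Prop := 0 ≤ n
instance (n : Int) : Decidable (Pre_mostFrequentDigitSum n) := by
  unfold Pre_mostFrequentDigitSum; infer_instance

def pvWitness_mostFrequentDigitSum : Int := 100

def Spec_mostFrequentDigitSum (n : Int) (out : Int) : Prop := out = mostFrequentDigitSum_alt n
instance (n : Int) (out : Int) : Decidable (Spec_mostFrequentDigitSum n out) := by unfold Spec_mostFrequentDigitSum; infer_instance

-- ===== CLAIM (what is proved, stated in full; the proofs are below) =====
def Claim_equal_mostFrequentDigitSum : Prop := ∀ (n : Int), Dom_mostFrequentDigitSum n → Pre_mostFrequentDigitSum n → Spec_mostFrequentDigitSum n (mostFrequentDigitSum n)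

-- ===== LEMMAS AND PROOFS =====

-- reference digit sum on Nat
def pvNatDS : Nat → Nat
  | 0 => 0
  | n + 1 => (n + 1) % 10 + pvNatDS ((n + 1) / 10)
decreasing_by exact Nat.div_lt_self (Nat.succ_pos n) (by norm_num)

theorem pvNatDS_le (m : Nat) : pvNatDS m ≤ m := by
  induction m using Nat.strong_induction_on with
  | _ m ih =>
    match m with
    | 0 => simp [pvNatDS]
    | n + 1 =>
      rw [pvNatDS]
      have h1 : pvNatDS ((n + 1) / 10) ≤ (n + 1) / 10 :=
        ih _ (Nat.div_lt_self (Nat.succ_pos n) (by norm_num))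
      have h2 := Nat.div_add_mod (n + 1) 10
      omega

theorem pvNatDS_eq_zero (m : Nat) : pvNatDS m = 0 ↔ m = 0 := by
  induction m using Nat.strong_induction_on with
  | _ m ih =>
    match m with
    | 0 => simp [pvNatDS]
    | n + 1 =>
      rw [pvNatDS]
      constructor
      · intro h
        have hq : pvNatDS ((n + 1) / 10) = 0 := by omega
        have := (ih _ (Nat.div_lt_self (Nat.succ_pos n) (by norm_num))).mp hq
        omega
      · intro h; omega

theorem pvDigitVal (d : Nat) (hd : d < 10) :
    ((PySem.Int.ofChars? [Nat.digitChar d]).getD 0) = (d : Int) := by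
  interval_cases d <;> decide

theorem pvCoreSum : ∀ (fuel m : Nat) (acc : List Char), m < fuel →
    ((Nat.toDigitsCore 10 fuel m acc).map (fun c => (PySem.Int.ofChars? [c]).getD 0)).sum
      = (pvNatDS m : Int)
        + ((acc.map (fun c => (PySem.Int.ofChars? [c]).getD 0)).sum) := by
  intro fuel
  induction fuel with
  | zero => intro m acc h; omega
  | succ fuel ih =>
    intro m acc h
    rw [Nat.toDigitsCore]
    by_cases h0 : m / 10 = 0
    · rw [if_pos h0]
      simp only [List.map_cons, List.sum_cons]
      rw [pvDigitVal _ (Nat.mod_lt _ (by norm_num))]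
      match m with
      | 0 => simp [pvNatDS]
      | k + 1 => rw [pvNatDS, h0, pvNatDS]; push_cast; ring
    · rw [if_neg h0]
      have hm : m ≠ 0 := by intro hc; simp [hc] at h0
      have hlt : m / 10 < fuel := by
        have := Nat.div_lt_self (Nat.pos_of_ne_zero hm) (show 1 < 10 by norm_num)
        omega
      rw [ih _ _ hlt]
      simp only [List.map_cons, List.sum_cons]
      rw [pvDigitVal _ (Nat.mod_lt _ (by norm_num))]
      match m with
      | 0 => exact absurd rfl hm
      | k + 1 => rw [pvNatDS]; push_cast; ring

theorem pvDigitSumA_eq (n : Int) (hn : 0 ≤ n) : pvDigitSumA n = (pvNatDS n.toNat : Int) := by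
  unfold pvDigitSumA PySem.Int.toChars
  rw [if_neg (by omega)]
  rw [Nat.toDigits, pvCoreSum _ _ _ (Nat.lt_succ_self _)]
  simp

-- value represented by a little-endian digit list
def pvVal : List Int → Int
  | [] => 0
  | d :: t => d + 10 * pvVal t

theorem pvVal_append_single (acc : List Int) (r : Int) :
    pvVal (acc ++ [r]) = pvVal acc + r * 10 ^ acc.length := by
  induction acc with
  | nil => simp [pvVal]
  | cons x t ih => simp [pvVal, ih]; ring

theorem pvVal_nonneg (D : List Int) (h : ∀ d ∈ D, 0 ≤ d ∧ d < 10) : 0 ≤ pvVal D := by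
  induction D with
  | nil => simp [pvVal]
  | cons x t ih =>
    have hx := h x (by simp)
    have ht := ih (fun d hd => h d (by simp [hd]))
    simp only [pvVal]; omega

theorem pvVal_lt (D : List Int) (h : ∀ d ∈ D, 0 ≤ d ∧ d < 10) :
    pvVal D < 10 ^ D.length := by
  induction D with
  | nil => simp [pvVal]
  | cons x t ih =>
    have hx := h x (by simp)
    have ht := ih (fun d hd => h d (by simp [hd]))
    simp only [pvVal, List.length_cons, pow_succ]
    nlinarith

theorem pvSum_eq_NatDS (D : List Int) (h : ∀ d ∈ D, 0 ≤ d ∧ d < 10) :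
    D.sum = (pvNatDS (pvVal D).toNat : Int) := by
  induction D with
  | nil => simp [pvVal, pvNatDS]
  | cons x t ih =>
    have hx := h x (by simp)
    have ht := fun d hd => h d (List.mem_cons_of_mem _ hd)
    have hvt : 0 ≤ pvVal t := pvVal_nonneg t ht
    have iht := ih ht
    simp only [pvVal, List.sum_cons]
    by_cases hv : x + 10 * pvVal t = 0
    · have hx0 : x = 0 := by omega
      have hvt0 : pvVal t = 0 := by omega
      rw [hvt0] at iht
      simp only [Int.toNat_zero] at iht
      have h1 : (x + 10 * pvVal t).toNat = 0 := by omega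
      rw [h1]
      simp only [pvNatDS] at iht ⊢
      omega
    · have hpos : 0 < x + 10 * pvVal t := by omega
      obtain ⟨w, hw⟩ : ∃ w : Nat, (x + 10 * pvVal t).toNat = w + 1 := by
        refine ⟨(x + 10 * pvVal t).toNat - 1, by omega⟩
      rw [hw, pvNatDS]
      have hmod : (w + 1) % 10 = x.toNat := by omega
      have hdiv : (w + 1) / 10 = (pvVal t).toNat := by omega
      rw [hmod, hdiv]
      push_cast
      rw [← iht]
      omega

theorem pvVal_set (D : List Int) (i : Nat) (d : Int) (h : i < D.length) :
    pvVal (D.set i d) = pvVal D + (d - D.getD i 0) * 10 ^ i := by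
  induction D generalizing i with
  | nil => simp at h
  | cons x t ih =>
    cases i with
    | zero => simp [pvVal]; ring
    | succ j =>
      have hj : j < t.length := by simpa using h
      simp only [List.set_cons_succ, pvVal, List.getD_cons_succ, ih j hj, pow_succ]
      ring

theorem pvSum_set (D : List Int) (i : Nat) (d : Int) (h : i < D.length) :
    (D.set i d).sum = D.sum + (d - D.getD i 0) := by
  induction D generalizing i with
  | nil => simp at h
  | cons x t ih =>
    cases i with
    | zero => simp [List.sum_cons]; ring
    | succ j =>
      have hj : j < t.length := by simpa using h
      simp only [List.set_cons_succ, List.sum_cons, List.getD_cons_succ, ih j hj]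
      ring

theorem pvDigits_spec : ∀ (fuel : Nat) (m : Int) (acc : List Int), 0 ≤ m → m.toNat < fuel →
    (∀ d ∈ acc, 0 ≤ d ∧ d < 10) →
    (∀ d ∈ pvDigits fuel m acc, 0 ≤ d ∧ d < 10) ∧
      pvVal (pvDigits fuel m acc) = pvVal acc + m * 10 ^ acc.length := by
  intro fuel
  induction fuel with
  | zero => intro m acc h1 h2 _; omega
  | succ fuel ih =>
    intro m acc h1 h2 hacc
    by_cases hm : m = 0
    · subst hm; simp [pvDigits]; exact hacc
    · rw [pvDigits, if_pos hm]
      obtain ⟨k, rfl⟩ : ∃ k : Nat, m = (k : Int) := ⟨m.toNat, by omega⟩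
      have hk : k ≠ 0 := by simpa using hm
      have hfd : PySem.Int.floordiv (k : Int) 10 = ((k / 10 : Nat) : Int) := by
        rw [PySem.Int.floordiv_eq_ediv_of_pos (by norm_num)]; omega
      have hmd : PySem.Int.mod (k : Int) 10 = ((k % 10 : Nat) : Int) := by
        rw [PySem.Int.mod_eq_emod_of_pos (by norm_num)]; omega
      have hacc' : ∀ d ∈ acc ++ [PySem.Int.mod (k : Int) 10], 0 ≤ d ∧ d < 10 := by
        intro d hd
        rcases List.mem_append.mp hd with hd | hd
        · exact hacc d hd
        · simp only [List.mem_singleton] at hd; subst hd; rw [hmd]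
          constructor
          · exact Int.natCast_nonneg _
          · exact_mod_cast Nat.mod_lt k (by norm_num)
      have hlt : ((PySem.Int.floordiv (k : Int) 10).toNat) < fuel := by
        rw [hfd]
        have := Nat.div_lt_self (Nat.pos_of_ne_zero hk) (show 1 < 10 by norm_num)
        simp only [Int.toNat_natCast] at h2 ⊢
        omega
      obtain ⟨hb, hv⟩ := ih (PySem.Int.floordiv (k : Int) 10) (acc ++ [PySem.Int.mod (k : Int) 10])
        (by rw [hfd]; exact Int.natCast_nonneg _) hlt hacc'
      refine ⟨hb, ?_⟩
      rw [hv, pvVal_append_single]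
      simp only [List.length_append, List.length_cons, List.length_nil]
      rw [hfd, hmd]
      have hsplit : ((k % 10 : Nat) : Int) + 10 * ((k / 10 : Nat) : Int) = (k : Int) := by
        push_cast; omega
      rw [pow_succ]
      linear_combination ((10 : Int) ^ acc.length) * hsplit

-- inner borrow loop: preserves digit bounds, length, the represented value minus
-- borrow·10^i, and keeps ns equal to the current digit sum
theorem pvBSub_spec : ∀ (fuel : Nat) (D : List Int) (i : Nat) (borrow ns : Int),
    (∀ d ∈ D, 0 ≤ d ∧ d < 10) → 0 ≤ borrow → ns = D.sum →
    0 ≤ pvVal D - borrow * 10 ^ i → D.length - i < fuel →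
    (∀ d ∈ (pvBSub fuel D i borrow ns).1, 0 ≤ d ∧ d < 10) ∧
      pvVal (pvBSub fuel D i borrow ns).1 = pvVal D - borrow * 10 ^ i ∧
      (pvBSub fuel D i borrow ns).2 = (pvBSub fuel D i borrow ns).1.sum := by
  intro fuel
  induction fuel with
  | zero => intro D i borrow ns _ _ _ _ h5; omega
  | succ fuel ih =>
    intro D i borrow ns hD hb hns hval hfuel
    by_cases h0 : borrow = 0
    · subst h0
      have hstep : pvBSub (fuel + 1) D i 0 ns = (D, ns) := by rw [pvBSub]; simp
      rw [hstep]
      exact ⟨hD, by ring, hns⟩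
    · rw [pvBSub, if_pos h0]
      have hbpos : 0 < borrow := lt_of_le_of_ne hb (Ne.symm h0)
      -- i is in range
      have hDlt : pvVal D < 10 ^ D.length := pvVal_lt D hD
      have hilt : i < D.length := by
        by_contra hcon
        have hcon' : D.length ≤ i := Nat.le_of_not_lt hcon
        have h1 : (10 : Int) ^ D.length ≤ 10 ^ i := pow_le_pow_right₀ (by norm_num) hcon'
        have hp : (0 : Int) < 10 ^ i := pow_pos (by norm_num) i
        have h2 : (10 : Int) ^ i ≤ borrow * 10 ^ i := le_mul_of_one_le_left (le_of_lt hp) hbpos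
        linarith
      have hget : (PySem.List.pyGet? D (i : Int)).getD 0 = D.getD i 0 := by
        simp [PySem.List.pyGet?_natCast, List.getElem?_eq_getElem hilt, List.getD_eq_getElem?_getD]
      set di := D.getD i 0 with hdi
      have hdibnd : 0 ≤ di ∧ di < 10 := by
        have : di ∈ D := by
          rw [hdi, List.getD_eq_getElem?_getD, List.getElem?_eq_getElem hilt]
          exact List.getElem_mem hilt
        exact hD di this
      have hr : PySem.Int.mod borrow 10 = borrow % 10 :=
        PySem.Int.mod_eq_emod_of_pos (by norm_num)
      have hq : PySem.Int.floordiv borrow 10 = borrow / 10 :=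
        PySem.Int.floordiv_eq_ediv_of_pos (by norm_num)
      have hrbnd : 0 ≤ borrow % 10 ∧ borrow % 10 < 10 := ⟨Int.emod_nonneg _ (by norm_num), Int.emod_lt_of_pos _ (by norm_num)⟩
      have hqnn : 0 ≤ borrow / 10 := Int.ediv_nonneg hb (by norm_num)
      have hsplit : borrow = 10 * (borrow / 10) + borrow % 10 := by omega
      simp only [hget, hr, hq]
      set r := borrow % 10
      set b0 := borrow / 10
      set d := di - r with hd
      set d' := if d < 0 then d + 10 else d with hd'
      set b' := if d < 0 then b0 + 1 else b0 with hb'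
      have hd'bnd : 0 ≤ d' ∧ d' < 10 := by
        rw [hd']; split_ifs with hneg <;> omega
      have hb'nn : 0 ≤ b' := by rw [hb']; split_ifs <;> omega
      have hbounds' : ∀ x ∈ D.set i d', 0 ≤ x ∧ x < 10 := by
        intro x hx
        rcases List.mem_or_eq_of_mem_set hx with hx | hx
        · exact hD x hx
        · subst hx; exact hd'bnd
      have hvalset : pvVal (D.set i d') = pvVal D + (d' - di) * 10 ^ i :=
        pvVal_set D i d' hilt
      have hsumset : (D.set i d').sum = D.sum + (d' - di) := pvSum_set D i d' hilt
      have hinv : pvVal (D.set i d') - b' * 10 ^ (i + 1) = pvVal D - borrow * 10 ^ i := by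
        rw [hvalset, pow_succ, hd', hb']
        split_ifs with hneg
        · rw [hd]; linear_combination ((10 : Int) ^ i) * hsplit
        · rw [hd]; linear_combination ((10 : Int) ^ i) * hsplit
      have hlen : (D.set i d').length = D.length := List.length_set
      have hfuel' : (D.set i d').length - (i + 1) < fuel := by
        rw [hlen]; omega
      obtain ⟨r1, r2, r3⟩ := ih (D.set i d') (i + 1) b' (ns + (d' - di)) hbounds' hb'nn
        (by rw [hsumset, hns]) (by rw [hinv]; exact hval) hfuel'
      exact ⟨r1, by rw [r2, hinv], r3⟩

-- outer loops in lockstep: B's tally-as-you-go over the digit array equals the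
-- counter of A's collected digit-sum list
theorem pvLoop_lockstep : ∀ (fuel : Nat) (n : Int) (D : List Int) (acc : List Int),
    0 ≤ n → (∀ d ∈ D, 0 ≤ d ∧ d < 10) → pvVal D = n →
    pvBMain fuel D D.sum (List.foldl (fun d x => d.insert x (d.getD x 0 + 1)) PySem.Dict.empty acc)
      = List.foldl (fun d x => d.insert x (d.getD x 0 + 1)) PySem.Dict.empty (pvALoop fuel n acc) := by
  intro fuel
  induction fuel with
  | zero => intro n D acc _ _ _; rfl
  | succ fuel ih =>
    intro n D acc hn hD hval
    have hsum : D.sum = (pvNatDS n.toNat : Int) := by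
      rw [pvSum_eq_NatDS D hD, hval]
    by_cases h0 : n = 0
    · subst h0
      have : D.sum = 0 := by rw [hsum]; simp [pvNatDS]
      rw [pvBMain, pvALoop]
      simp [this]
    · have hds0 : pvNatDS n.toNat ≠ 0 := by
        rw [Ne, pvNatDS_eq_zero]; omega
      have hsne : D.sum ≠ 0 := by rw [hsum]; exact_mod_cast hds0
      rw [pvBMain, if_pos hsne, pvALoop, if_pos h0]
      have hAds : pvDigitSumA n = D.sum := by rw [pvDigitSumA_eq n hn, hsum]
      have hdsle : D.sum ≤ n := by
        rw [hsum]
        have := pvNatDS_le n.toNat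
        omega
      have hdspos : 0 < D.sum := by
        rcases lt_trichotomy 0 (D.sum) with h | h | h
        · exact h
        · exact absurd h.symm hsne
        · -- digit sums of nonneg digits are nonneg
          have : 0 ≤ D.sum := List.sum_nonneg (fun d hd => (hD d hd).1)
          omega
      obtain ⟨r1, r2, r3⟩ := pvBSub_spec (D.length + 1) D 0 D.sum D.sum hD (le_of_lt hdspos)
        rfl (by rw [pow_zero, hval]; omega) (by omega)
      have hval' : pvVal (pvBSub (D.length + 1) D 0 D.sum D.sum).1 = n - D.sum := by
        rw [r2, pow_zero, hval]; ring
      have := ih (n - D.sum) (pvBSub (D.length + 1) D 0 D.sum D.sum).1 (acc ++ [D.sum])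
        (by omega) r1 hval'
      rw [← r3] at this
      simp only [List.foldl_append, List.foldl_cons, List.foldl_nil] at this
      rw [hAds]
      exact this

-- the two extraction folds, named so that the induction can rewrite one step at a time
def pvAStep (st : Int × Int) (kv : Int × Int) : Int × Int :=
  if kv.2 > st.1 then (kv.2, kv.1)
  else if kv.2 = st.1 then (st.1, max kv.1 st.2)
  else st

def pvBStep (acc : Option (Int × Int)) (x : Int × Int) : Option (Int × Int) :=
  match acc with
  | none => some x
  | some m =>
    if (decide (m.2 < x.2) || !decide (x.2 < m.2) && decide (m.1 < x.1)) = true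
    then some x else some m

theorem pvBStep_some (mc mk k v : Int) :
    pvBStep (some (mk, mc)) (k, v)
      = some ((pvAStep (mc, mk) (k, v)).2, (pvAStep (mc, mk) (k, v)).1) := by
  unfold pvBStep pvAStep
  rcases lt_trichotomy mc v with h1 | h1 | h1
  · simp [h1, not_lt_of_gt h1]
  · subst h1
    by_cases h3 : mk < k
    · simp [h3, max_eq_left (le_of_lt h3)]
    · simp [h3, max_eq_right (le_of_not_gt h3)]
  · simp [h1, not_lt_of_gt h1, ne_of_lt h1]

theorem pvFold_lockstep : ∀ (l : List (Int × Int)) (mc mk : Int),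
    List.foldl pvBStep (some (mk, mc)) l
      = some ((List.foldl pvAStep (mc, mk) l).2, (List.foldl pvAStep (mc, mk) l).1) := by
  intro l
  induction l with
  | nil => intro mc mk; rfl
  | cons kv t ih =>
    intro mc mk
    obtain ⟨k, v⟩ := kv
    simp only [List.foldl_cons]
    rw [pvBStep_some]
    obtain ⟨a, b⟩ := pvAStep (mc, mk) (k, v)
    simpa using ih a b

-- extraction agrees on the items of any counter (all counts are ≥ 0)
theorem pvExtract_agree (L : List Int) :
    ((PySem.List.max2? (PySem.Dict.counter L).items (fun kv => kv.2) (fun kv => kv.1)).getD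
        (-1, 0)).1
      = ((PySem.Dict.counter L).items.foldl
          (fun (st : Int × Int) kv =>
            if kv.2 > st.1 then (kv.2, kv.1)
            else if kv.2 = st.1 then (st.1, max kv.1 st.2)
            else st) (-1, -1)).2 := by
  have hmax : PySem.List.max2? (PySem.Dict.counter L).items (fun kv => kv.2) (fun kv => kv.1)
      = List.foldl pvBStep none (PySem.Dict.counter L).items := by
    unfold PySem.List.max2?
    congr 1
    funext acc x
    cases acc <;> rfl
  have hfold : ∀ (xs : List (Int × Int)) (st : Int × Int),
      xs.foldl (fun (st : Int × Int) kv =>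
        if kv.2 > st.1 then (kv.2, kv.1)
        else if kv.2 = st.1 then (st.1, max kv.1 st.2)
        else st) st = xs.foldl pvAStep st := fun xs st => rfl
  rw [hmax, hfold]
  rw [PySem.Dict.items_counter]
  cases hS : PySem.Set.ofList L with
  | nil => rfl
  | cons k0 t =>
    simp only [List.map_cons, List.foldl_cons]
    have hb : pvBStep none (k0, (List.count k0 L : Int)) = some (k0, (List.count k0 L : Int)) := rfl
    have hpos : (-1 : Int) < (List.count k0 L : Int) := by
      have := Int.natCast_nonneg (List.count k0 L); omega
    have ha : pvAStep (-1, -1) (k0, (List.count k0 L : Int))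
        = ((List.count k0 L : Int), k0) := by
      unfold pvAStep; rw [if_pos hpos]
    rw [hb, ha, pvFold_lockstep]
    rfl

-- ===== VERDICT (by name: the statement is the Claim_ definition above) =====
theorem mostFrequentDigitSum_spec : Claim_equal_mostFrequentDigitSum := by
  intro n _ hpre
  unfold Spec_mostFrequentDigitSum mostFrequentDigitSum mostFrequentDigitSum_alt
  obtain ⟨hDb, hDv⟩ := pvDigits_spec (n.toNat + 1) n [] hpre (Nat.lt_succ_self _)
    (by intro d hd; simp at hd)
  have hval : pvVal (pvDigits (n.toNat + 1) n []) = n := by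
    simpa [pvVal] using hDv
  have hb : pvBMain (n.toNat + 1) (pvDigits (n.toNat + 1) n [])
        (pvDigits (n.toNat + 1) n []).sum PySem.Dict.empty
      = PySem.Dict.counter (pvALoop (n.toNat + 1) n []) := by
    have := pvLoop_lockstep (n.toNat + 1) n (pvDigits (n.toNat + 1) n []) [] hpre hDb hval
    simpa [PySem.Dict.foldl_insert_getD_add_one_eq_counter] using this
  simp only [hb]
  exact (pvExtract_agree (pvALoop (n.toNat + 1) n [])).symm
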